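-- pv_equiv track=rewrite | github.com/Huthayfa0/universal-puzzle-solver | solver/slither_link_solver.py | _is_single_cycle
-- ===== SOURCE A (Python) =====
-- def _is_single_cycle(used_set):
--     """Check that used_set forms a single cycle (one loop, no branches)."""
--     if not used_set:
--         return False
--     adj = {}
--     for (a, b) in used_set:
--         adj.setdefault(a, []).append(b)
--         adj.setdefault(b, []).append(a)
--     for v in adj:
--         if len(adj[v]) != 2:
--             return False
--     # Check connected: one component
--     start = next(iter(used_set))[0]
--     visited = {start}
--     stack = [start]
--     while stack:
--         v = stack.pop()
--         for u in adj[v]: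
--             if u not in visited:
--                 visited.add(u)
--                 stack.append(u)
--     return len(visited) == len(adj)
-- ===== SOURCE B (Python) =====
-- def _is_single_cycle(used_set):
--     """Check that used_set forms a single cycle (one loop, no branches)."""
--     if not used_set:
--         return False
--     adj = {}
--     for (a, b) in used_set:
--         adj.setdefault(a, []).append(b)
--         adj.setdefault(b, []).append(a)
--     if any(len(ns) != 2 for ns in adj.values()):
--         return False
--     # Connectivity by bounded saturation instead of an explicit DFS stack:
--     # grow the reachable set by one neighbourhood step, len(adj) times.
--     reach = {next(iter(used_set))[0]}
--     for _ in range(len(adj)):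
--         reach = reach | {u for v in reach for u in adj[v]}
--     return len(reach) == len(adj)
-- ===== Notes on version B (the rewrite author's own statement) =====
-- stated objective: alternative
-- what changed: The connectivity test is re-done as a bounded neighbourhood-saturation fixpoint: instead of A's explicit-stack DFS with a visited set, B repeatedly unions the reachable set with the neighbours of its members len(adj) times and then compares sizes; the empty-set guard, adjacency build and degree-2 test are kept (the degree loop becomes an any() over the values).
import Mathlib
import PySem

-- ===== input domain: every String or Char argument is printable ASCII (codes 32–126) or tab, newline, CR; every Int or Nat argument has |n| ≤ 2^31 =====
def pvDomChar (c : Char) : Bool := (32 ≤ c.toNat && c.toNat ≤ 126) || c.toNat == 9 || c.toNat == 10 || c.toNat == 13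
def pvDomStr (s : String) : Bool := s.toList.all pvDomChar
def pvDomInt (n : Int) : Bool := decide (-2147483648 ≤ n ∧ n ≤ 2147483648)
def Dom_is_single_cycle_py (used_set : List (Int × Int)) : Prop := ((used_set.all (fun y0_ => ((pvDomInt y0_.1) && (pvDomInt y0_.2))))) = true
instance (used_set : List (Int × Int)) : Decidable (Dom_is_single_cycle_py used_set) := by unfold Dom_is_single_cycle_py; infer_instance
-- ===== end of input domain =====

-- B replaces A's explicit-stack DFS connectivity check by a bounded neighbourhood-saturation
-- (fixpoint) computation over a set; same degree test, same return values (objective: alternative).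

-- ===== PORT A =====
-- adjacency build: adj.setdefault(x, []).append(y) is Dict.modify x [] (· ++ [y])
def pvBuildAdjA (used_set : List (Int × Int)) : PySem.Dict Int (List Int) :=
  used_set.foldl
    (fun adj p => (adj.modify p.1 [] (fun l => l ++ [p.2])).modify p.2 [] (fun l => l ++ [p.1]))
    PySem.Dict.empty

-- 'for v in adj: if len(adj[v]) != 2: return False' (early-return loop over the items)
def pvDegLoopA : List (Int × List Int) → Bool
  | [] => true
  | (_, l) :: rest => if l.length ≠ 2 then false else pvDegLoopA rest

-- body of 'for u in adj[v]: if u not in visited: visited.add(u); stack.append(u)'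
-- (the Lean stack holds its top FIRST, so Python's append/pop at the tail is cons/uncons at the head)
def pvDfsStep (p : PySem.Set Int × List Int) (u : Int) : PySem.Set Int × List Int :=
  if p.1.contains u then p else (PySem.Set.add p.1 u, u :: p.2)

-- 'while stack: v = stack.pop(); …'; the fuel only makes the loop structurally terminating —
-- 2*len(adj)+1 iterations always suffice (proved below), so the loop always ends with stack = []
def pvDfsA (adj : PySem.Dict Int (List Int)) : Nat → PySem.Set Int → List Int → PySem.Set Int
  | 0, visited, _ => visited
  | _ + 1, visited, [] => visited
  | fuel + 1, visited, v :: stack =>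
    let p := (adj.getD v []).foldl pvDfsStep (visited, stack)
    pvDfsA adj fuel p.1 p.2

def is_single_cycle_py (used_set : List (Int × Int)) : Bool :=
  match used_set with
  | [] => false
  | (a0, _) :: _ =>
    let adj := pvBuildAdjA used_set
    if pvDegLoopA adj.items then
      let visited := pvDfsA adj (2 * adj.size + 1) (PySem.Set.ofList [a0]) [a0]
      PySem.Set.len visited == (adj.size : Int)
    else false

-- ===== PORT B =====
def pvBuildAdjB (used_set : List (Int × Int)) : PySem.Dict Int (List Int) :=
  used_set.foldl
    (fun adj p => (adj.modify p.1 [] (fun l => l ++ [p.2])).modify p.2 [] (fun l => l ++ [p.1]))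
    PySem.Dict.empty

-- one saturation round: reach | {u for v in reach for u in adj[v]}
def pvSatStep (adj : PySem.Dict Int (List Int)) (r : PySem.Set Int) : PySem.Set Int :=
  PySem.Set.union r (r.flatMap (fun v => adj.getD v []))

def is_single_cycle_py_alt (used_set : List (Int × Int)) : Bool :=
  match used_set with
  | [] => false
  | (a0, _) :: _ =>
    let adj := pvBuildAdjB used_set
    if adj.values.any (fun ns => ns.length != 2) then false
    else
      let reach := (List.range adj.size).foldl (fun r _ => pvSatStep adj r) (PySem.Set.ofList [a0])
      PySem.Set.len reach == (adj.size : Int)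

-- ===== PRECONDITION & SPEC =====
def Spec_is_single_cycle_py (used_set : List (Int × Int)) (out : Bool) : Prop := out = is_single_cycle_py_alt used_set
instance (used_set : List (Int × Int)) (out : Bool) : Decidable (Spec_is_single_cycle_py used_set out) := by unfold Spec_is_single_cycle_py; infer_instance

-- ===== CLAIM (what is proved, stated in full; the proofs are below) =====
def Claim_equal_is_single_cycle_py : Prop := ∀ (used_set : List (Int × Int)), Dom_is_single_cycle_py used_set → Spec_is_single_cycle_py used_set (is_single_cycle_py used_set)

-- ===== LEMMAS AND PROOFS =====

-- the doubled edge list: each (a,b) contributes the directed pairs (a,b) and (b,a)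
def pvPairs (us : List (Int × Int)) : List (Int × Int) :=
  us.flatMap (fun p => [(p.1, p.2), (p.2, p.1)])

lemma pvBuild_eq (us : List (Int × Int)) : ∀ d : PySem.Dict Int (List Int),
    us.foldl (fun adj p => (adj.modify p.1 [] (fun l => l ++ [p.2])).modify p.2 [] (fun l => l ++ [p.1])) d
      = (pvPairs us).foldl (fun d p => d.modify p.1 [] (fun l => l ++ [p.2])) d := by
  induction us with
  | nil => intro d; rfl
  | cons p us ih =>
    intro d
    simp only [pvPairs, List.flatMap_cons, List.foldl_append, List.foldl_cons, List.foldl_nil]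
    exact ih _

lemma pvGetD_adj (us : List (Int × Int)) (c : Int) :
    (pvBuildAdjA us).getD c [] = ((pvPairs us).filter (fun p => p.1 == c)).map (fun p => p.2) := by
  unfold pvBuildAdjA
  rw [pvBuild_eq]
  simpa using PySem.Dict.getD_foldl_modify_append (pvPairs us) PySem.Dict.empty c

lemma pvKeys_adj (us : List (Int × Int)) :
    (pvBuildAdjA us).keys = PySem.Set.ofList ((pvPairs us).map (fun p => p.1)) := by
  unfold pvBuildAdjA
  rw [pvBuild_eq]
  have h := PySem.Dict.keys_foldl_modify_key (pvPairs us) (fun p => p.1) ([] : List Int)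
      (fun _ p => (fun l => l ++ [p.2])) PySem.Dict.empty
  simpa [PySem.Set.update_nil_left] using h

lemma pvNbr_sub_keys (us : List (Int × Int)) :
    ∀ v u, u ∈ (pvBuildAdjA us).getD v [] → u ∈ (pvBuildAdjA us).keys := by
  intro v u hu
  rw [pvGetD_adj] at hu
  rw [pvKeys_adj]
  rw [PySem.Set.mem_ofList]
  obtain ⟨p, hp, rfl⟩ := List.mem_map.mp hu
  have hp' := List.mem_filter.mp hp
  obtain ⟨q, hq, hpq⟩ := List.mem_flatMap.mp hp'.1
  simp only [List.mem_cons, List.not_mem_nil, or_false] at hpq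
  rcases hpq with rfl | rfl
  · -- p = (q.1, q.2): p.2 = q.2 is fst of (q.2, q.1)
    exact List.mem_map.mpr ⟨(q.2, q.1), List.mem_flatMap.mpr ⟨q, hq, by simp⟩, rfl⟩
  · exact List.mem_map.mpr ⟨(q.1, q.2), List.mem_flatMap.mpr ⟨q, hq, by simp⟩, rfl⟩

lemma pvFst_mem_keys (a0 b0 : Int) (rest : List (Int × Int)) :
    a0 ∈ (pvBuildAdjA ((a0, b0) :: rest)).keys := by
  rw [pvKeys_adj, PySem.Set.mem_ofList]
  exact List.mem_map.mpr ⟨(a0, b0), List.mem_flatMap.mpr ⟨(a0, b0), by simp, by simp⟩, rfl⟩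

lemma pvKeysLen (d : PySem.Dict Int (List Int)) : d.keys.length = d.size := by
  simp [PySem.Dict.keys, PySem.Dict.size]

lemma pvSubset_length {l1 l2 : List Int} (h1 : l1.Nodup) (hs : ∀ x ∈ l1, x ∈ l2) :
    l1.length ≤ l2.length :=
  List.Subperm.length_le (List.subperm_of_subset h1 hs)

lemma pvDegLoop_eq : ∀ items : List (Int × List Int),
    pvDegLoopA items = !(items.any fun p => p.2.length != 2) := by
  intro items
  induction items with
  | nil => rfl
  | cons p rest ih =>
    obtain ⟨a, l⟩ := p
    by_cases h : l.length = 2 <;> simp [pvDegLoopA, h, ih]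

-- === DFS (port A) characterisation ===

lemma pvDfs_inner (L : List Int) :
    ∀ (vs : PySem.Set Int) (st : List Int), vs.Nodup →
    ∃ ns : List Int, L.foldl pvDfsStep (vs, st) = (vs ++ ns, ns.reverse ++ st) ∧
      (vs ++ ns).Nodup ∧ (∀ x ∈ ns, x ∈ L) ∧ (∀ u ∈ L, u ∈ vs ++ ns) := by
  induction L with
  | nil =>
    intro vs st hnd
    exact ⟨[], by simp, by simpa using hnd, by simp, by simp⟩
  | cons u L ih =>
    intro vs st hnd
    by_cases hu : u ∈ vs
    · obtain ⟨ns, h1, h2, h3, h4⟩ := ih vs st hnd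
      refine ⟨ns, ?_, h2, fun x hx => List.mem_cons_of_mem _ (h3 x hx), ?_⟩
      · simpa [pvDfsStep, hu] using h1
      · intro w hw
        rcases List.mem_cons.mp hw with rfl | hw
        · exact List.mem_append.mpr (Or.inl hu)
        · exact h4 w hw
    · have hnd' : (vs ++ [u]).Nodup :=
        List.Nodup.append hnd (List.nodup_singleton u)
          (fun a ha hb => hu ((List.mem_singleton.mp hb) ▸ ha))
      obtain ⟨ns, h1, h2, h3, h4⟩ := ih (vs ++ [u]) (u :: st) hnd'
      refine ⟨u :: ns, ?_, ?_, ?_, ?_⟩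
      · have hstep : (u :: L).foldl pvDfsStep (vs, st) = L.foldl pvDfsStep (vs ++ [u], u :: st) := by
          simp [pvDfsStep, hu]
        rw [hstep, h1]
        simp [List.append_assoc, List.reverse_cons]
      · simpa using h2
      · intro x hx
        rcases List.mem_cons.mp hx with rfl | hx
        · exact List.mem_cons_self ..
        · exact List.mem_cons_of_mem _ (h3 x hx)
      · intro w hw
        rcases List.mem_cons.mp hw with rfl | hw
        · simp
        · have := h4 w hw
          simp only [List.append_assoc, List.singleton_append] at this ⊢
          exact this

lemma pvDfs_spec (adj : PySem.Dict Int (List Int))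
    (Hadj : ∀ v u, u ∈ adj.getD v [] → u ∈ adj.keys) :
    ∀ (fuel : Nat) (vs : PySem.Set Int) (st : List Int),
    vs.Nodup → (∀ x ∈ st, x ∈ vs) → (∀ x ∈ vs, x ∈ adj.keys) →
    (∀ v ∈ vs, v ∈ st ∨ ∀ u ∈ adj.getD v [], u ∈ vs) →
    2 * adj.keys.length + st.length ≤ 2 * vs.length + fuel →
    (pvDfsA adj fuel vs st).Nodup ∧
    (∀ x ∈ vs, x ∈ pvDfsA adj fuel vs st) ∧
    (∀ v ∈ pvDfsA adj fuel vs st, ∀ u ∈ adj.getD v [], u ∈ pvDfsA adj fuel vs st) ∧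
    (∀ S : List Int, (∀ v ∈ S, ∀ u ∈ adj.getD v [], u ∈ S) → (∀ x ∈ vs, x ∈ S) →
      ∀ x ∈ pvDfsA adj fuel vs st, x ∈ S) := by
  intro fuel
  induction fuel with
  | zero =>
    intro vs st hnd hst hk hcl hf
    have hlen : vs.length ≤ adj.keys.length := pvSubset_length hnd hk
    have hst0 : st = [] := by
      cases st with
      | nil => rfl
      | cons a t => exfalso; simp only [List.length_cons] at hf; omega
    subst hst0
    refine ⟨by simpa [pvDfsA] using hnd, by simp [pvDfsA], ?_, ?_⟩
    · intro v hv u hu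
      rcases hcl v (by simpa [pvDfsA] using hv) with h | h
      · simp at h
      · simpa [pvDfsA] using h u hu
    · intro S _ hvsS x hx
      exact hvsS x (by simpa [pvDfsA] using hx)
  | succ fuel ih =>
    intro vs st hnd hst hk hcl hf
    cases st with
    | nil =>
      refine ⟨by simpa [pvDfsA] using hnd, by simp [pvDfsA], ?_, ?_⟩
      · intro v hv u hu
        rcases hcl v (by simpa [pvDfsA] using hv) with h | h
        · simp at h
        · simpa [pvDfsA] using h u hu
      · intro S _ hvsS x hx
        exact hvsS x (by simpa [pvDfsA] using hx)
    | cons v st =>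
      obtain ⟨ns, heq, hnd', hnsL, hLsub⟩ := pvDfs_inner (adj.getD v []) vs st hnd
      have hv_vs : v ∈ vs := hst v (List.mem_cons_self ..)
      have hstep : pvDfsA adj (fuel + 1) vs (v :: st) = pvDfsA adj fuel (vs ++ ns) (ns.reverse ++ st) := by
        simp only [pvDfsA, heq]
      have hst' : ∀ x ∈ ns.reverse ++ st, x ∈ vs ++ ns := by
        intro x hx
        rcases List.mem_append.mp hx with hx | hx
        · exact List.mem_append.mpr (Or.inr (List.mem_reverse.mp hx))
        · exact List.mem_append.mpr (Or.inl (hst x (List.mem_cons_of_mem _ hx)))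
      have hk' : ∀ x ∈ vs ++ ns, x ∈ adj.keys := by
        intro x hx
        rcases List.mem_append.mp hx with hx | hx
        · exact hk x hx
        · exact Hadj v x (hnsL x hx)
      have hcl' : ∀ w ∈ vs ++ ns, w ∈ ns.reverse ++ st ∨ ∀ u ∈ adj.getD w [], u ∈ vs ++ ns := by
        intro w hw
        rcases List.mem_append.mp hw with hw | hw
        · rcases hcl w hw with hmem | hclosed
          · rcases List.mem_cons.mp hmem with rfl | hmem
            · exact Or.inr hLsub
            · exact Or.inl (List.mem_append.mpr (Or.inr hmem))
          · exact Or.inr (fun u hu => List.mem_append.mpr (Or.inl (hclosed u hu)))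
        · exact Or.inl (List.mem_append.mpr (Or.inl (List.mem_reverse.mpr hw)))
      have hf' : 2 * adj.keys.length + (ns.reverse ++ st).length ≤ 2 * (vs ++ ns).length + fuel := by
        simp only [List.length_append, List.length_reverse, List.length_cons] at hf ⊢
        omega
      obtain ⟨c1, c2, c3, c4⟩ := ih (vs ++ ns) (ns.reverse ++ st) hnd' hst' hk' hcl' hf'
      rw [hstep]
      refine ⟨c1, ?_, c3, ?_⟩
      · intro x hx
        exact c2 x (List.mem_append.mpr (Or.inl hx))
      · intro S hS hvsS x hx
        have hvs'S : ∀ x ∈ vs ++ ns, x ∈ S := by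
          intro y hy
          rcases List.mem_append.mp hy with hy | hy
          · exact hvsS y hy
          · exact hS v (hvsS v hv_vs) y (hnsL y hy)
        exact c4 S hS hvs'S x hx

-- === saturation (port B) characterisation ===

lemma pvSat_append (adj : PySem.Dict Int (List Int)) (r : PySem.Set Int) :
    ∃ δ : List Int, pvSatStep adj r = r ++ δ := by
  have : pvSatStep adj r = PySem.Set.update r (r.flatMap (fun v => adj.getD v [])) := rfl
  rw [this, PySem.Set.update_eq_append_filter]
  exact ⟨_, rfl⟩

lemma pvSat_mem (adj : PySem.Dict Int (List Int)) (r : PySem.Set Int) (y : Int) :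
    y ∈ pvSatStep adj r ↔ y ∈ r ∨ ∃ v ∈ r, y ∈ adj.getD v [] := by
  unfold pvSatStep
  rw [PySem.Set.mem_union]
  simp [List.mem_flatMap]

lemma pvIter_nodup_sub (adj : PySem.Dict Int (List Int))
    (Hadj : ∀ v u, u ∈ adj.getD v [] → u ∈ adj.keys)
    (r0 : PySem.Set Int) (h0 : r0.Nodup) (hk0 : ∀ x ∈ r0, x ∈ adj.keys) :
    ∀ n, ((pvSatStep adj)^[n] r0).Nodup ∧ (∀ x ∈ (pvSatStep adj)^[n] r0, x ∈ adj.keys) := by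
  intro n
  induction n with
  | zero => exact ⟨h0, hk0⟩
  | succ n ih =>
    rw [Function.iterate_succ_apply']
    refine ⟨PySem.Set.nodup_union _ _ ih.1, ?_⟩
    intro x hx
    rcases (pvSat_mem adj _ x).mp hx with hx | ⟨v, hv, hx⟩
    · exact ih.2 x hx
    · exact Hadj v x hx

lemma pvIter_mono (adj : PySem.Dict Int (List Int)) (r0 : PySem.Set Int) :
    ∀ n, ∀ x ∈ r0, x ∈ (pvSatStep adj)^[n] r0 := by
  intro n
  induction n with
  | zero => intro x hx; exact hx
  | succ n ih =>
    intro x hx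
    rw [Function.iterate_succ_apply']
    exact (pvSat_mem adj _ x).mpr (Or.inl (ih x hx))

lemma pvIter_min (adj : PySem.Dict Int (List Int)) (r0 : PySem.Set Int) (S : List Int)
    (hS : ∀ v ∈ S, ∀ u ∈ adj.getD v [], u ∈ S) (h0 : ∀ x ∈ r0, x ∈ S) :
    ∀ n, ∀ x ∈ (pvSatStep adj)^[n] r0, x ∈ S := by
  intro n
  induction n with
  | zero => exact h0
  | succ n ih =>
    intro x hx
    rw [Function.iterate_succ_apply'] at hx
    rcases (pvSat_mem adj _ x).mp hx with hx | ⟨v, hv, hx⟩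
    · exact ih x hx
    · exact hS v (ih v hv) x hx

lemma pvIter_fix_or (adj : PySem.Dict Int (List Int)) (r0 : PySem.Set Int) :
    ∀ n, pvSatStep adj ((pvSatStep adj)^[n] r0) = (pvSatStep adj)^[n] r0 ∨
      r0.length + n ≤ ((pvSatStep adj)^[n] r0).length := by
  intro n
  induction n with
  | zero => right; simp
  | succ n ih =>
    by_cases hfx : pvSatStep adj ((pvSatStep adj)^[n] r0) = (pvSatStep adj)^[n] r0
    · left
      rw [Function.iterate_succ_apply', hfx]
      exact hfx
    · rcases ih with hfix | hlen
      · exact absurd hfix hfx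
      · right
        rw [Function.iterate_succ_apply']
        obtain ⟨δ, hδ⟩ := pvSat_append adj ((pvSatStep adj)^[n] r0)
        cases δ with
        | nil => exact absurd (by simpa using hδ) hfx
        | cons a t =>
          rw [hδ]
          simp only [List.length_append, List.length_cons]
          omega

lemma pvSat_closed_of_fix (adj : PySem.Dict Int (List Int)) (T : PySem.Set Int)
    (hfix : pvSatStep adj T = T) : ∀ v ∈ T, ∀ u ∈ adj.getD v [], u ∈ T := by
  intro v hv u hu
  rw [← hfix]
  exact (pvSat_mem adj T u).mpr (Or.inr ⟨v, hv, hu⟩)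

lemma pvFoldl_range_iterate {α : Type} (f : α → α) (x : α) :
    ∀ n, (List.range n).foldl (fun a _ => f a) x = f^[n] x := by
  intro n
  induction n with
  | zero => rfl
  | succ n ih =>
    rw [List.range_succ, List.foldl_append, ih, Function.iterate_succ_apply']
    rfl

lemma pvSetLen_eq (s : PySem.Set Int) : PySem.Set.len s = (s.length : Int) := rfl

-- === main equality ===

lemma pvMain_eq : ∀ us : List (Int × Int), is_single_cycle_py us = is_single_cycle_py_alt us := by
  intro us
  match us with
  | [] => rfl
  | (a0, b0) :: rest =>
    have hBA : pvBuildAdjB ((a0, b0) :: rest) = pvBuildAdjA ((a0, b0) :: rest) := rfl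
    have hdeg : pvDegLoopA (pvBuildAdjA ((a0, b0) :: rest)).items
        = !((pvBuildAdjA ((a0, b0) :: rest)).values.any fun ns => ns.length != 2) := by
      rw [pvDegLoop_eq]
      simp [PySem.Dict.values, List.any_map, Function.comp_def]
    show (if pvDegLoopA (pvBuildAdjA ((a0, b0) :: rest)).items then _ else false) = _
    show _ = (if (pvBuildAdjB ((a0, b0) :: rest)).values.any (fun ns => ns.length != 2) then false else _)
    rw [hBA, hdeg]
    cases hany : (pvBuildAdjA ((a0, b0) :: rest)).values.any (fun ns => ns.length != 2) with
    | true => simp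
    | false =>
      simp only [Bool.not_false, if_true]
      have Hadj := pvNbr_sub_keys ((a0, b0) :: rest)
      have Ha0 := pvFst_mem_keys a0 b0 rest
      have hK := pvKeysLen (pvBuildAdjA ((a0, b0) :: rest))
      have hofl : PySem.Set.ofList [a0] = [a0] := rfl
      rw [hofl, pvFoldl_range_iterate]
      set adj := pvBuildAdjA ((a0, b0) :: rest) with hadj
      set K := adj.size with hKdef
      set T := (pvSatStep adj)^[K] ([a0] : PySem.Set Int) with hT
      obtain ⟨Rnd, Rsup, Rcl, Rmin⟩ := pvDfs_spec adj Hadj (2 * K + 1) [a0] [a0]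
        (List.nodup_singleton a0)
        (fun x hx => hx)
        (by intro x hx; rcases List.mem_singleton.mp hx with rfl; exact Ha0)
        (by intro v hv; exact Or.inl hv)
        (by simp only [List.length_singleton]; omega)
      obtain ⟨Tnd, Tsub⟩ := pvIter_nodup_sub adj Hadj [a0] (List.nodup_singleton a0)
        (by intro x hx; rcases List.mem_singleton.mp hx with rfl; exact Ha0) K
      have Tfix : pvSatStep adj T = T := by
        rcases pvIter_fix_or adj [a0] K with hfix | hlen
        · exact hfix
        · exfalso
          have hle : T.length ≤ adj.keys.length := pvSubset_length Tnd Tsub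
          rw [← hT] at hlen
          simp only [List.length_singleton] at hlen
          omega
      have Tcl := pvSat_closed_of_fix adj T Tfix
      have Ta0 : a0 ∈ T := pvIter_mono adj [a0] K a0 (List.mem_singleton_self a0)
      have hRT : (pvDfsA adj (2 * K + 1) [a0] [a0]).Perm T := by
        rw [List.perm_ext_iff_of_nodup Rnd Tnd]
        intro x
        constructor
        · exact fun hx => Rmin T Tcl
            (by intro y hy; rcases List.mem_singleton.mp hy with rfl; exact Ta0) x hx
        · exact fun hx => pvIter_min adj [a0] _ Rcl (fun y hy => Rsup y hy) K x hx
      rw [pvSetLen_eq, pvSetLen_eq, hRT.length_eq]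
      simp

-- ===== VERDICT (by name: the statement is the Claim_ definition above) =====
theorem is_single_cycle_py_spec : Claim_equal_is_single_cycle_py := by
  intro us _
  exact pvMain_eq us
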